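-- pv_equiv track=rewrite | github.com/McClain-Thiel/PlasmidLLM | src/nextflow/bin/seq_qc.py | find_hairpins
-- ===== SOURCE A (Python) =====
-- def find_hairpins(sequence: str, stem_min: int = 6, loop_min: int = 3, loop_max: int = 8) -> int:
--     """
--     Estimate number of potential hairpin structures.
--     Simple heuristic based on inverted repeats.
--     """
--     sequence = sequence.upper()
--     complement = {"A": "T", "T": "A", "G": "C", "C": "G"}
--     hairpin_count = 0
--
--     for i in range(len(sequence) - stem_min * 2 - loop_min):
--         stem = sequence[i:i + stem_min]
--
--         # Look for complement in downstream region
--         for loop_size in range(loop_min, loop_max + 1):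
--             j = i + stem_min + loop_size
--             if j + stem_min > len(sequence):
--                 break
--
--             potential_stem = sequence[j:j + stem_min]
--             complement_stem = "".join(complement.get(b, "N") for b in stem)[::-1]
--
--             if potential_stem == complement_stem:
--                 hairpin_count += 1
--                 break
--
--     return hairpin_count
-- ===== SOURCE B (Python) =====
-- def find_hairpins(sequence: str, stem_min: int = 6, loop_min: int = 3, loop_max: int = 8) -> int:
--     """Count potential hairpins via a k-mer position index instead of a per-i downstream scan."""
--     sequence = sequence.upper()
--     complement = {"A": "T", "T": "A", "G": "C", "C": "G"}
--     n = len(sequence)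
--     if n - stem_min * 2 - loop_min <= 0:
--         return 0  # no candidate stem start exists; skip building the index
--     index = {}
--     for p in range(n - stem_min + 1):
--         index.setdefault(sequence[p:p + stem_min], []).append(p)
--     count = 0
--     for i in range(n - stem_min * 2 - loop_min):
--         rc = "".join(complement.get(b, "N") for b in sequence[i:i + stem_min])[::-1]
--         lo = i + stem_min + loop_min
--         hi = min(i + stem_min + loop_max, n - stem_min)
--         if any(lo <= p <= hi for p in index.get(rc, [])):
--             count += 1
--     return count
-- ===== Notes on version B (the rewrite author's own statement) =====
-- stated objective: alternative
-- what changed: B builds a k-mer -> positions dict index of the sequence in one pass and decides each candidate hairpin by an interval lookup in that index, replacing A's per-position downstream scan with early breaks.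
-- outside the precondition, e.g. on find_hairpins('', -4, -1, 0): A returns 9, B returns 5
import Mathlib
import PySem

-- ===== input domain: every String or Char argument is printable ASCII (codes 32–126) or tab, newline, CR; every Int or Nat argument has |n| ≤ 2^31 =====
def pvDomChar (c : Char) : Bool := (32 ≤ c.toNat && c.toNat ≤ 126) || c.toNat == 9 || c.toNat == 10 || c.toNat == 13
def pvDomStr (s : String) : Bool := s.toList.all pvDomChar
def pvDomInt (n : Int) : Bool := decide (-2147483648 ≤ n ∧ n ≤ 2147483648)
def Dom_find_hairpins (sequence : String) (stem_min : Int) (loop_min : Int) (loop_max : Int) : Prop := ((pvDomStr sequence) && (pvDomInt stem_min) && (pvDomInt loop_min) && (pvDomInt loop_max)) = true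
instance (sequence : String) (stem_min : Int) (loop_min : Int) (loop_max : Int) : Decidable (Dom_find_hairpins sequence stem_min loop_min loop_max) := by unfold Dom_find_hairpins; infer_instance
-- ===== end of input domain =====

-- B replaces A's per-position downstream window scan by a k-mer → positions index
-- built once, then one interval lookup per position (objective: alternative data structure).

-- ===== PORT A =====
-- Python's dict of 1-character strings {"A":"T","T":"A","G":"C","C":"G"} with .get(b,"N"),
-- ported exactly as a Char-keyed dict (every key and value is a single character).
def pvComplDict : PySem.Dict Char Char :=
  PySem.Dict.ofList [('A', 'T'), ('T', 'A'), ('G', 'C'), ('C', 'G')]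

-- A's inner `for loop_size in range(loop_min, loop_max+1)` with its two `break`s
-- (j = i + stem_min + loop_size is inlined; the complement stem is recomputed each
-- iteration exactly as the Python does).
def pvInnerA (cs : List Char) (n s i : Int) (stem : List Char) : List Int → Bool
  | [] => false
  | ls :: rest =>
    if i + s + ls + s > n then false
    else if PySem.List.slice cs (some (i + s + ls)) (some (i + s + ls + s)) =
              (stem.map (fun b => pvComplDict.getD b 'N')).reverse then true
    else pvInnerA cs n s i stem rest

def find_hairpins (sequence : String) (stem_min : Int) (loop_min : Int) (loop_max : Int) : Int :=
  let cs := (PySem.Str.upper sequence).toList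
  let n : Int := cs.length
  (PySem.List.pyRange 0 (n - stem_min * 2 - loop_min)).foldl
    (fun acc i =>
      let stem := PySem.List.slice cs (some i) (some (i + stem_min))
      if pvInnerA cs n stem_min i stem (PySem.List.pyRange loop_min (loop_max + 1)) then acc + 1
      else acc) 0

-- ===== PORT B =====
-- the (k-mer, position) pairs `(sequence[p:p+stem_min], p)` for p in range(n - stem_min + 1)
def pvKmers (cs : List Char) (n s : Int) : List (List Char × Int) :=
  (PySem.List.pyRange 0 (n - s + 1)).map
    (fun p => (PySem.List.slice cs (some p) (some (p + s)), p))

def find_hairpins_alt (sequence : String) (stem_min : Int) (loop_min : Int) (loop_max : Int) : Int :=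
  let cs := (PySem.Str.upper sequence).toList
  let n : Int := cs.length
  if n - stem_min * 2 - loop_min ≤ 0 then 0 else  -- no candidate stem start: skip the index
  -- index.setdefault(k, []).append(p)
  let index := (pvKmers cs n stem_min).foldl
    (fun d q => d.modify q.1 ([] : List Int) (fun v => v ++ [q.2])) PySem.Dict.empty
  (PySem.List.pyRange 0 (n - stem_min * 2 - loop_min)).foldl
    (fun acc i =>
      let rc := ((PySem.List.slice cs (some i) (some (i + stem_min))).map
                  (fun b => pvComplDict.getD b 'N')).reverse
      let lo := i + stem_min + loop_min
      let hi := min (i + stem_min + loop_max) (n - stem_min)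
      if (index.getD rc []).any (fun p => decide (lo ≤ p) && decide (p ≤ hi)) then acc + 1
      else acc) 0

-- ===== PRECONDITION & SPEC =====
-- Pre_ excludes negative stem_min / loop_min: lengths of a stem and a loop are outside the
-- function's natural domain (A still returns a meaningless count there; B's index does not
-- reproduce Python's negative-slice accidents).
def Pre_find_hairpins (sequence : String) (stem_min : Int) (loop_min : Int) (loop_max : Int) : Prop :=
  0 ≤ stem_min ∧ 0 ≤ loop_min

instance (sequence : String) (stem_min : Int) (loop_min : Int) (loop_max : Int) : Decidable (Pre_find_hairpins sequence stem_min loop_min loop_max) := by unfold Pre_find_hairpins; infer_instance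

def pvWitness_find_hairpins : String × Int × Int × Int := ("GGGCGCAAAAGCGCCC", 6, 3, 8)

def Spec_find_hairpins (sequence : String) (stem_min : Int) (loop_min : Int) (loop_max : Int) (out : Int) : Prop := out = find_hairpins_alt sequence stem_min loop_min loop_max
instance (sequence : String) (stem_min : Int) (loop_min : Int) (loop_max : Int) (out : Int) : Decidable (Spec_find_hairpins sequence stem_min loop_min loop_max out) := by unfold Spec_find_hairpins; infer_instance

-- ===== CLAIM (what is proved, stated in full; the proofs are below) =====
def Claim_equal_find_hairpins : Prop := ∀ (sequence : String) (stem_min : Int) (loop_min : Int) (loop_max : Int), Dom_find_hairpins sequence stem_min loop_min loop_max → Pre_find_hairpins sequence stem_min loop_min loop_max → Spec_find_hairpins sequence stem_min loop_min loop_max (find_hairpins sequence stem_min loop_min loop_max)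

-- ===== LEMMAS AND PROOFS =====

-- A's inner scan-with-break over range(a, b) succeeds iff some admissible downstream
-- position matches (the break condition i+s+ls+s > n is monotone in ls, so breaking
-- early loses no match).
lemma pvInnerA_iff (cs : List Char) (n s i : Int) (stem : List Char) (k : Nat) :
    ∀ (a b : Int), (b - a).toNat ≤ k →
      (pvInnerA cs n s i stem (PySem.List.pyRange a b) = true ↔
        ∃ ls, a ≤ ls ∧ ls < b ∧ i + s + ls + s ≤ n ∧
          PySem.List.slice cs (some (i + s + ls)) (some (i + s + ls + s)) =
            (stem.map (fun b => pvComplDict.getD b 'N')).reverse) := by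
  induction k with
  | zero =>
    intro a b h
    rw [PySem.List.pyRange_one_eq_nil (by omega)]
    simp only [pvInnerA, Bool.false_eq_true, false_iff]
    rintro ⟨ls, h1, h2, -⟩; omega
  | succ k ih =>
    intro a b h
    by_cases hab : b ≤ a
    · rw [PySem.List.pyRange_one_eq_nil hab]
      simp only [pvInnerA, Bool.false_eq_true, false_iff]
      rintro ⟨ls, h1, h2, -⟩; omega
    · rw [PySem.List.pyRange_one_cons (by omega)]
      simp only [pvInnerA]
      split_ifs with hbreak hmatch
      · simp only [false_iff]
        rintro ⟨ls, h1, h2, h3, -⟩; omega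
      · exact iff_of_true rfl ⟨a, le_refl a, by omega, by omega, hmatch⟩
      · rw [ih (a + 1) b (by omega)]
        constructor
        · rintro ⟨ls, h1, h2, h3, h4⟩; exact ⟨ls, by omega, h2, h3, h4⟩
        · rintro ⟨ls, h1, h2, h3, h4⟩
          refine ⟨ls, ?_, h2, h3, h4⟩
          rcases eq_or_lt_of_le h1 with rfl | hlt
          · exact absurd h4 hmatch
          · omega

-- the built index maps a k-mer to exactly the positions (in range order) carrying it
lemma pvIndex_getD (cs : List Char) (n s : Int) (rc : List Char) :
    ((pvKmers cs n s).foldl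
        (fun d q => d.modify q.1 ([] : List Int) (fun v => v ++ [q.2])) PySem.Dict.empty).getD rc []
      = (PySem.List.pyRange 0 (n - s + 1)).filter
          (fun p => PySem.List.slice cs (some p) (some (p + s)) == rc) := by
  rw [PySem.Dict.getD_foldl_modify_append]
  simp [pvKmers, List.filter_map, Function.comp_def]

theorem find_hairpins_spec : Claim_equal_find_hairpins := by
  intro sequence stem_min loop_min loop_max _hdom hpre
  obtain ⟨hs, hlm⟩ := hpre
  unfold Spec_find_hairpins find_hairpins find_hairpins_alt
  by_cases hm : (((PySem.Str.upper sequence).toList.length : Int) - stem_min * 2 - loop_min ≤ 0)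
  · have hnil := PySem.List.pyRange_one_eq_nil
      (a := (0 : Int)) (b := ((PySem.Str.upper sequence).toList.length : Int) - stem_min * 2 - loop_min) hm
    simp only [if_pos hm, hnil, List.foldl_nil]
  rw [if_neg hm]
  apply PySem.List.foldl_congr_mem
  intro acc i hi
  have hi0 : 0 ≤ i := (PySem.List.mem_pyRange_one.mp hi).1
  set cs := (PySem.Str.upper sequence).toList with hcs
  set n : Int := (cs.length : Int) with hn
  have hn0 : 0 ≤ n := by positivity
  set rc := ((PySem.List.slice cs (some i) (some (i + stem_min))).map
              (fun b => pvComplDict.getD b 'N')).reverse with hrc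
  have hcond :
      pvInnerA cs n stem_min i (PySem.List.slice cs (some i) (some (i + stem_min)))
          (PySem.List.pyRange loop_min (loop_max + 1))
        = (((pvKmers cs n stem_min).foldl
              (fun d q => d.modify q.1 ([] : List Int) (fun v => v ++ [q.2]))
              PySem.Dict.empty).getD rc []).any
            (fun p => decide (i + stem_min + loop_min ≤ p) &&
                      decide (p ≤ min (i + stem_min + loop_max) (n - stem_min))) := by
    rw [Bool.eq_iff_iff]
    rw [pvInnerA_iff cs n stem_min i _ (loop_max + 1 - loop_min).toNat loop_min (loop_max + 1)
        (le_refl _)]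
    rw [pvIndex_getD, List.any_eq_true]
    constructor
    · rintro ⟨ls, h1, h2, h3, h4⟩
      refine ⟨i + stem_min + ls, List.mem_filter.mpr ⟨PySem.List.mem_pyRange_one.mpr ⟨by omega, by omega⟩, ?_⟩, ?_⟩
      · have harg : i + stem_min + ls + stem_min = i + stem_min + ls + stem_min := rfl
        simpa [hrc] using (beq_iff_eq.mpr h4)
      · simp only [Bool.and_eq_true, decide_eq_true_eq]
        exact ⟨by omega, by omega⟩
    · rintro ⟨p, hpmem, hpwin⟩
      obtain ⟨hprange, hpk⟩ := List.mem_filter.mp hpmem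
      obtain ⟨hp0, hp1⟩ := PySem.List.mem_pyRange_one.mp hprange
      simp only [Bool.and_eq_true, decide_eq_true_eq] at hpwin
      refine ⟨p - i - stem_min, by omega, by omega, by omega, ?_⟩
      have h1 : i + stem_min + (p - i - stem_min) = p := by omega
      rw [h1]
      exact beq_iff_eq.mp hpk
  simp only [hcond]
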